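-- pv_equiv track=rewrite | github.com/sarahrab/SaraProjectMay | py_part/is_sorted_polyndrom.py | is_sorted_polyndrom
-- ===== SOURCE A (Python) =====
-- def is_sorted_polyndrom(could_be_polyndrom: str) -> bool:
--     first = could_be_polyndrom[0]
--     if could_be_polyndrom[len(could_be_polyndrom) - 1] != first:
--         return False
--     i = 1
--     while i < len(could_be_polyndrom) / 2:
--         if (could_be_polyndrom[i] != could_be_polyndrom[len(could_be_polyndrom) - 1 - i]) or (
--                 could_be_polyndrom[i] < first):
--             return False
--         first = could_be_polyndrom[i]
--         i= i+1
--     return True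
-- ===== SOURCE B (Python) =====
-- # B: two whole-list passes (reversal compare + sort-and-compare) instead of A's interleaved index loop.
-- def is_sorted_polyndrom(could_be_polyndrom: str) -> bool:
--     half = could_be_polyndrom[:(len(could_be_polyndrom) + 1) // 2]
--     return could_be_polyndrom == could_be_polyndrom[::-1] and sorted(half) == list(half)
-- ===== Notes on version B (the rewrite author's own statement) =====
-- stated objective: simpler
-- what changed: Replaces A's single interleaved index loop (pairwise palindrome check fused with a running-maximum sortedness check) by two separate whole-string passes: reversal comparison for the palindrome test and sort-and-compare on the first half; the per-character Python loop is replaced by C-implemented slicing/reversal/sort, a constant-factor speedup.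
import Mathlib
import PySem

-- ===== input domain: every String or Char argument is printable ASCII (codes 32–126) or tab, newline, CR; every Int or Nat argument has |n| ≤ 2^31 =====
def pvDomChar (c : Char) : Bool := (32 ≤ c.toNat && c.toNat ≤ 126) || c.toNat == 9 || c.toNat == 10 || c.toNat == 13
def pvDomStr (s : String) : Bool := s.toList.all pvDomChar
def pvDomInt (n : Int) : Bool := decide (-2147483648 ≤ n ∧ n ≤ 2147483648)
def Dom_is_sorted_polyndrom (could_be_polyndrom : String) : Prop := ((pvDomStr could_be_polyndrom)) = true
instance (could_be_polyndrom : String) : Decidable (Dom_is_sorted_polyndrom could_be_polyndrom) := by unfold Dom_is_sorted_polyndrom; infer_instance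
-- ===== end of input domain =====

-- B replaces A's single interleaved index loop by two whole-string passes
-- (reversal comparison + sort-and-compare on the first half); same cost class, simpler.

-- ===== PORT A =====
-- the while loop: 'i < len/2' with Python's true division is exact for ints as 2*i < len
def isLoopA (cs : List Char) (first : Char) (i : Nat) : Bool :=
  if h : 2 * i < cs.length then
    let c := cs.getD i ' '
    if c ≠ cs.getD (cs.length - 1 - i) ' ' ∨ c < first then false
    else isLoopA cs c (i + 1)
  else true
termination_by cs.length - i
decreasing_by omega

def is_sorted_polyndrom (could_be_polyndrom : String) : Bool :=
  match PySem.List.pyGet? could_be_polyndrom.toList 0 with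
  | none => false   -- could_be_polyndrom[0] raises IndexError in Python; excluded by Pre_
  | some first =>
    if could_be_polyndrom.toList.getD (could_be_polyndrom.toList.length - 1) ' ' ≠ first then false
    else isLoopA could_be_polyndrom.toList first 1

-- ===== PORT B =====
def is_sorted_polyndrom_alt (could_be_polyndrom : String) : Bool :=
  let cs := could_be_polyndrom.toList
  let half := cs.take ((cs.length + 1) / 2)
  (cs == cs.reverse) && (PySem.List.sorted half (fun x => x) false == half)

-- ===== PRECONDITION & SPEC =====
-- Pre_ excludes only the empty string, on which A raises IndexError.
def Pre_is_sorted_polyndrom (could_be_polyndrom : String) : Prop := could_be_polyndrom ≠ ""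
instance (could_be_polyndrom : String) : Decidable (Pre_is_sorted_polyndrom could_be_polyndrom) := by unfold Pre_is_sorted_polyndrom; infer_instance
def pvWitness_is_sorted_polyndrom : String := "aba"

def Spec_is_sorted_polyndrom (could_be_polyndrom : String) (out : Bool) : Prop := out = is_sorted_polyndrom_alt could_be_polyndrom
instance (could_be_polyndrom : String) (out : Bool) : Decidable (Spec_is_sorted_polyndrom could_be_polyndrom out) := by unfold Spec_is_sorted_polyndrom; infer_instance

-- ===== CLAIM (what is proved, stated in full; the proofs are below) =====
def Claim_equal_is_sorted_polyndrom : Prop := ∀ (could_be_polyndrom : String), Dom_is_sorted_polyndrom could_be_polyndrom → Pre_is_sorted_polyndrom could_be_polyndrom → Spec_is_sorted_polyndrom could_be_polyndrom (is_sorted_polyndrom could_be_polyndrom)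

-- ===== LEMMAS AND PROOFS =====

-- loop characterization: mirror pairs hold from i on, and the visited first-half
-- segment extended with `first` is a ≤-chain
theorem isLoopA_iff (cs : List Char) (first : Char) (i : Nat) :
    isLoopA cs first i = true ↔
      ((∀ j, i ≤ j → 2 * j < cs.length → cs.getD j ' ' = cs.getD (cs.length - 1 - j) ' ') ∧
       List.IsChain (· ≤ ·) (first :: (cs.drop i).take ((cs.length + 1) / 2 - i))) := by
  induction first, i using isLoopA.induct cs with
  | case1 first i h c hfail =>
    rw [isLoopA, dif_pos h, if_pos hfail]
    constructor
    · intro hx; exact absurd hx (by simp)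
    · rintro ⟨hpairs, hchain⟩
      rcases hfail with hne | hlt
      · exact (hne (hpairs i le_rfl h)).elim
      · have hi : i < cs.length := by omega
        have hseg : (cs.drop i).take ((cs.length + 1) / 2 - i)
            = cs.getD i ' ' :: (cs.drop (i+1)).take ((cs.length + 1) / 2 - (i+1)) := by
          rw [show (cs.length + 1) / 2 - i = ((cs.length + 1) / 2 - (i+1)) + 1 by omega,
              List.drop_eq_getElem_cons hi, List.take_succ_cons,
              List.getD_eq_getElem _ _ hi]
        rw [hseg, List.isChain_cons] at hchain
        have := hchain.1 (cs.getD i ' ') (by simp)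
        exact absurd this (by simpa using hlt)
  | case2 first i h c hok ih =>
    rw [isLoopA, dif_pos h, if_neg hok]
    simp only [not_or, ne_eq, not_not, not_lt] at hok
    obtain ⟨heq, hle⟩ := hok
    have hi : i < cs.length := by omega
    have hseg : (cs.drop i).take ((cs.length + 1) / 2 - i)
        = cs.getD i ' ' :: (cs.drop (i+1)).take ((cs.length + 1) / 2 - (i+1)) := by
      rw [show (cs.length + 1) / 2 - i = ((cs.length + 1) / 2 - (i+1)) + 1 by omega,
          List.drop_eq_getElem_cons hi, List.take_succ_cons,
          List.getD_eq_getElem _ _ hi]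
    rw [ih, hseg]
    constructor
    · rintro ⟨hpairs, hchain⟩
      refine ⟨?_, ?_⟩
      · intro j hij hj
        rcases Nat.eq_or_lt_of_le hij with rfl | hlt'
        · exact heq
        · exact hpairs j hlt' hj
      · rw [List.isChain_cons]
        exact ⟨fun y hy => by simp only [List.head?_cons, Option.mem_def, Option.some.injEq] at hy; rw [← hy]; exact hle, hchain⟩
    · rintro ⟨hpairs, hchain⟩
      rw [List.isChain_cons] at hchain
      exact ⟨fun j hij hj => hpairs j (by omega) hj, hchain.2⟩
  | case3 first i h =>
    rw [isLoopA, dif_neg h]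
    constructor
    · intro _
      refine ⟨fun j hij hj => by omega, ?_⟩
      have h0 : (cs.length + 1) / 2 - i = 0 := by omega
      rw [h0]
      simp [List.isChain_cons]
    · intro _; rfl


theorem palindrome_iff (cs : List Char) :
    (cs = cs.reverse) ↔ (∀ j, 2 * j < cs.length → cs.getD j ' ' = cs.getD (cs.length - 1 - j) ' ') := by
  constructor
  · intro h j hj
    have hj1 : j < cs.length := by omega
    have hj2 : cs.length - 1 - j < cs.length := by omega
    rw [List.getD_eq_getElem _ _ hj1, List.getD_eq_getElem _ _ hj2]
    rw [List.getElem_of_eq h hj1, List.getElem_reverse]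
  · intro h
    apply List.ext_getElem (by simp)
    intro j hj hj'
    rw [List.getElem_reverse]
    by_cases hc : 2 * j < cs.length
    · have := h j hc
      rw [List.getD_eq_getElem _ _ hj, List.getD_eq_getElem _ _ (by omega : cs.length - 1 - j < cs.length)] at this
      exact this
    · have hc' : 2 * (cs.length - 1 - j) < cs.length := by omega
      have := h (cs.length - 1 - j) hc'
      rw [List.getD_eq_getElem _ _ (by omega : cs.length - 1 - j < cs.length),
          List.getD_eq_getElem _ _ (by omega : cs.length - 1 - (cs.length - 1 - j) < cs.length)] at this
      have hjj : cs.length - 1 - (cs.length - 1 - j) = j := by omega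
      simp_rw [hjj] at this
      exact this.symm

theorem sorted_eq_self_iff (l : List Char) :
    (PySem.List.sorted l (fun x => x) false = l) ↔ l.Pairwise (· ≤ ·) := by
  constructor
  · intro h
    have := PySem.List.sorted_pairwise (xs := l) (key := fun x => x)
    rw [h] at this
    exact this
  · intro h
    exact PySem.List.sorted_eq_self_of_pairwise l (fun x => x) h

theorem toList_ne_nil (s : String) (h : s ≠ "") : s.toList ≠ [] := by
  intro hnil
  exact h (by simpa using congrArg String.ofList hnil)

-- ===== VERDICT (by name: the statement is the Claim_ definition above) =====
theorem is_sorted_polyndrom_spec : Claim_equal_is_sorted_polyndrom := by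
  intro s _ hpre
  unfold Spec_is_sorted_polyndrom is_sorted_polyndrom is_sorted_polyndrom_alt
  obtain ⟨c0, tl, hcs⟩ := List.exists_cons_of_ne_nil (toList_ne_nil s hpre)
  rw [hcs]
  rw [PySem.List.pyGet?_zero_cons]
  change (if (c0 :: tl).getD ((c0 :: tl).length - 1) ' ' ≠ c0 then false
          else isLoopA (c0 :: tl) c0 1)
    = ((c0 :: tl) == (c0 :: tl).reverse
        && (PySem.List.sorted (((c0 :: tl)).take (((c0 :: tl).length + 1) / 2)) (fun x => x) false
            == ((c0 :: tl)).take (((c0 :: tl).length + 1) / 2)))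
  have hn : (c0 :: tl).length = tl.length + 1 := by simp
  by_cases hc : (c0 :: tl).getD ((c0 :: tl).length - 1) ' ' = c0
  · rw [if_neg (not_not_intro hc)]
    rw [Bool.eq_iff_iff]
    rw [isLoopA_iff]
    simp only [Bool.and_eq_true, beq_iff_eq]
    rw [palindrome_iff, sorted_eq_self_iff,
        ← List.isChain_iff_pairwise]
    have hhalf : ((c0 :: tl).length + 1) / 2 = (((c0 :: tl).length + 1) / 2 - 1) + 1 := by
      simp only [hn]; omega
    constructor
    · rintro ⟨hpairs, hchain⟩
      refine ⟨?_, ?_⟩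
      · intro j hj
        rcases Nat.eq_zero_or_pos j with rfl | hj1
        · simpa using hc.symm
        · exact hpairs j hj1 hj
      · rw [hhalf, List.take_succ_cons]
        simpa using hchain
    · rintro ⟨hpairs, hchain⟩
      refine ⟨fun j hj1 hj => hpairs j hj, ?_⟩
      rw [hhalf, List.take_succ_cons] at hchain
      simpa using hchain
  · rw [if_pos (by simpa using hc)]
    have hpal : ¬ ((c0 :: tl) = (c0 :: tl).reverse) := by
      intro h
      have := (palindrome_iff (c0 :: tl)).mp h 0 (by simp)
      simp only [List.getD_cons_zero, Nat.sub_zero] at this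
      exact hc this.symm
    rw [Bool.eq_iff_iff]
    simp only [Bool.and_eq_true, beq_iff_eq]
    constructor
    · intro hx; exact (Bool.false_ne_true hx).elim
    · rintro ⟨hp, -⟩; exact (hpal hp).elim
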